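-- pv_equiv track=rewrite | github.com/ihnatz/advent-of-code | day17/solution.py | allowed_movements_crucible
-- ===== SOURCE A (Python) =====
-- opposites = {'n': 's', 's': 'n', 'e': 'w', 'w': 'e'}
--
-- def allowed_movements_crucible(way):
--   stack = way[-3:]
--   prev = way[-1] if way else ''
--
--   if len(stack) < 3 or len(set(stack)) != 1:
--     return [v for v in [(0, 1, 's'), (0, -1, 'n'), (1, 0, 'e'), (-1, 0, 'w')] if opposites[v[2]] != prev]
--   if prev == 'w' or prev == 'e':
--     return [(0, 1, 's'), (0, -1, 'n')]
--   elif prev == 'n' or prev == 's':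
--     return [(1, 0, 'e'), (-1, 0, 'w')]
--   else:
--     raise Exception('Invalid direction')
-- ===== SOURCE B (Python) =====
-- DIRS = {'s': (0, 1), 'n': (0, -1), 'e': (1, 0), 'w': (-1, 0)}
--
-- def allowed_movements_crucible(way):
--   d = DIRS.get(way[-1]) if way else None
--   run3 = len(way) >= 3 and way[-3] == way[-2] == way[-1]
--   out = []
--   for c, v in DIRS.items():
--     if d is not None:
--       dot = v[0] * d[0] + v[1] * d[1]
--       if dot == -1 or (run3 and dot == 1):
--         continue
--     out.append((v[0], v[1], c))
--   return out
-- ===== Notes on version B (the rewrite author's own statement) =====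
-- stated objective: alternative
-- what changed: Drops the opposites dict and canned/filtered result lists: directions become unit vectors and each candidate move is kept or rejected by its dot product with the last move's vector (dot = -1 is a reversal, dot = +1 a straight continuation, forbidden only after three equal moves), accumulated in one loop over the direction table.
import Mathlib
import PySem

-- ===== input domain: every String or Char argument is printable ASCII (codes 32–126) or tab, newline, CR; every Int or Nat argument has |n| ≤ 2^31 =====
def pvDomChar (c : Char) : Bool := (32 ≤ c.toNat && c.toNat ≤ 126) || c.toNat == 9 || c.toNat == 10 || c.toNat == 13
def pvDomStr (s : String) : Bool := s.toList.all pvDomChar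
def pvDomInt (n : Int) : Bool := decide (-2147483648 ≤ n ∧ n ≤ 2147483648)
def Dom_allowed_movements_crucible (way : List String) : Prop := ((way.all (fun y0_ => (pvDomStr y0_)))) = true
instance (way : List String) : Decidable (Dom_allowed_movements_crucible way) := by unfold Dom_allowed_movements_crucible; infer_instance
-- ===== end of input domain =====

-- B replaces the opposites-dict/branch logic by vector arithmetic: moves are kept by
-- their dot product with the last direction's unit vector (objective: alternative).

-- ===== PORT A =====
-- module constant: opposites = {'n': 's', 's': 'n', 'e': 'w', 'w': 'e'}
def opposites : PySem.Dict String String :=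
  PySem.Dict.ofList [("n", "s"), ("s", "n"), ("e", "w"), ("w", "e")]

def allowed_movements_crucible (way : List String) : List (Int × Int × String) :=
  let stack := PySem.List.slice way (some (-3)) none
  let prev := if way = [] then "" else PySem.List.pyGetD way (-1) ""
  if stack.length < 3 ∨ (PySem.Set.ofList stack).length ≠ 1 then
    ([((0 : Int), (1 : Int), "s"), (0, -1, "n"), (1, 0, "e"), (-1, 0, "w")] : List (Int × Int × String)).filter
      (fun v => PySem.Dict.getD opposites v.2.2 "" != prev)
  else if prev = "w" ∨ prev = "e" then [(0, 1, "s"), (0, -1, "n")]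
  else if prev = "n" ∨ prev = "s" then [(1, 0, "e"), (-1, 0, "w")]
  else []  -- Python: raise Exception('Invalid direction'); excluded by Pre_

-- ===== PORT B =====
-- module constant: DIRS = {'s': (0, 1), 'n': (0, -1), 'e': (1, 0), 'w': (-1, 0)}
def pvDirs : PySem.Dict String (Int × Int) :=
  PySem.Dict.ofList [("s", (0, 1)), ("n", (0, -1)), ("e", (1, 0)), ("w", (-1, 0))]

-- the body of Source B's `for c, v in DIRS.items():` loop
def pvBStep (d : Option (Int × Int)) (run3 : Bool)
    (out : List (Int × Int × String)) (cv : String × Int × Int) : List (Int × Int × String) :=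
  match d with
  | some dd =>
    let dot := cv.2.1 * dd.1 + cv.2.2 * dd.2
    if dot = -1 ∨ (run3 ∧ dot = 1) then out else out ++ [(cv.2.1, cv.2.2, cv.1)]
  | none => out ++ [(cv.2.1, cv.2.2, cv.1)]

def allowed_movements_crucible_alt (way : List String) : List (Int × Int × String) :=
  let d : Option (Int × Int) :=
    if way = [] then none else PySem.Dict.get? pvDirs (PySem.List.pyGetD way (-1) "")
  let run3 : Bool := decide (3 ≤ way.length) &&
    (PySem.List.pyGetD way (-3) "" == PySem.List.pyGetD way (-2) "") &&
    (PySem.List.pyGetD way (-2) "" == PySem.List.pyGetD way (-1) "")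
  (PySem.Dict.items pvDirs).foldl (pvBStep d run3) []

-- ===== PRECONDITION & SPEC =====
-- Pre_ excludes exactly the inputs where A raises Exception('Invalid direction'):
-- a way ending in three identical strings that are not a valid direction.
def Pre_allowed_movements_crucible (way : List String) : Prop :=
  ¬ (3 ≤ way.length ∧
     PySem.List.pyGetD way (-2) "" = PySem.List.pyGetD way (-1) "" ∧
     PySem.List.pyGetD way (-3) "" = PySem.List.pyGetD way (-1) "" ∧
     PySem.List.pyGetD way (-1) "" ∉ (["n", "s", "e", "w"] : List String))
instance (way : List String) : Decidable (Pre_allowed_movements_crucible way) := by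
  unfold Pre_allowed_movements_crucible; infer_instance

def pvWitness_allowed_movements_crucible : List String := ["n", "n", "e"]

def Spec_allowed_movements_crucible (way : List String) (out : List (Int × Int × String)) : Prop :=
  out = allowed_movements_crucible_alt way
instance (way : List String) (out : List (Int × Int × String)) : Decidable (Spec_allowed_movements_crucible way out) := by
  unfold Spec_allowed_movements_crucible; infer_instance

-- ===== CLAIM (what is proved, stated in full; the proofs are below) =====
def Claim_equal_allowed_movements_crucible : Prop := ∀ (way : List String), Dom_allowed_movements_crucible way → Pre_allowed_movements_crucible way → Spec_allowed_movements_crucible way (allowed_movements_crucible way)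
-- ===== LEMMAS AND PROOFS =====

theorem get_pvDirs_none (a : String) (h1 : a ≠ "n") (h2 : a ≠ "s") (h3 : a ≠ "e") (h4 : a ≠ "w") :
    PySem.Dict.get? pvDirs a = none := by
  have h : pvDirs.items = [("s", ((0:Int), (1:Int))), ("n", (0, -1)), ("e", (1, 0)), ("w", (-1, 0))] := by decide
  simp [PySem.Dict.get?, h]
  exact ⟨h2.symm, h1.symm, h3.symm, h4.symm⟩

theorem ofList3_len (c b a : String) :
    (PySem.Set.ofList [c, b, a]).length = 1 ↔ (b = c ∧ a = c) := by
  simp [PySem.Set.ofList, PySem.Set.add]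
  split_ifs <;> simp_all

-- A's filter branch equals B's fold when the three-in-a-row flag is false, for any prev a.
theorem eq_norun (a : String) :
    List.filter (fun v => opposites.getD v.2.2 "" != a)
      ([((0:Int),(1:Int),"s"),(0,-1,"n"),(1,0,"e"),(-1,0,"w")] : List (Int × Int × String)) =
    (PySem.Dict.items pvDirs).foldl (pvBStep (PySem.Dict.get? pvDirs a) false) [] := by
  by_cases h1 : a = "n"; · subst h1; decide
  by_cases h2 : a = "s"; · subst h2; decide
  by_cases h3 : a = "e"; · subst h3; decide
  by_cases h4 : a = "w"; · subst h4; decide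
  have gs : opposites.getD "s" "" = "n" := by decide
  have gn : opposites.getD "n" "" = "s" := by decide
  have ge : opposites.getD "e" "" = "w" := by decide
  have gw : opposites.getD "w" "" = "e" := by decide
  have b1 : ("n" != a) = true := by simp [bne_iff_ne]; exact fun h => h1 h.symm
  have b2 : ("s" != a) = true := by simp [bne_iff_ne]; exact fun h => h2 h.symm
  have b3 : ("e" != a) = true := by simp [bne_iff_ne]; exact fun h => h3 h.symm
  have b4 : ("w" != a) = true := by simp [bne_iff_ne]; exact fun h => h4 h.symm
  rw [get_pvDirs_none a h1 h2 h3 h4]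
  simp [List.filter, gs, gn, ge, gw, b1, b2, b3, b4, pvBStep, PySem.Dict.items, pvDirs]
  decide

theorem ab_main : ∀ (way : List String), Pre_allowed_movements_crucible way →
    allowed_movements_crucible way = allowed_movements_crucible_alt way := by
  intro way hpre
  rcases List.eq_nil_or_concat way with rfl | ⟨xs, a, rfl⟩
  · decide
  rcases List.eq_nil_or_concat xs with rfl | ⟨ys, b, rfl⟩
  · -- way = [a]
    simp only [allowed_movements_crucible, allowed_movements_crucible_alt]
    rw [PySem.List.slice_from_neg_ofNat _ 3 (by omega)]
    simp only [List.concat_eq_append, List.nil_append]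
    simp [PySem.List.pyGetD, PySem.List.pyGet?, PySem.List.pyIdx?]
    exact eq_norun a
  rcases List.eq_nil_or_concat ys with rfl | ⟨zs, c, rfl⟩
  · -- way = [b, a]
    simp only [allowed_movements_crucible, allowed_movements_crucible_alt]
    rw [PySem.List.slice_from_neg_ofNat _ 3 (by omega)]
    simp only [List.concat_eq_append, List.nil_append]
    simp [PySem.List.pyGetD, PySem.List.pyGet?, PySem.List.pyIdx?]
    exact eq_norun a
  · -- way = zs ++ [c, b, a]
    have hway : ((zs.concat c).concat b).concat a = zs ++ [c, b, a] := by simp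
    rw [hway] at hpre ⊢
    have hlen : (zs ++ [c, b, a]).length = zs.length + 3 := by simp
    have hg1 : PySem.List.pyGetD (zs ++ [c, b, a]) (-1) "" = a := by
      have e1 : zs ++ [c, b, a] = (zs ++ [c, b]) ++ [a] := by simp
      rw [e1, PySem.List.pyGetD_neg_one_append_singleton]
    have hg2 : PySem.List.pyGetD (zs ++ [c, b, a]) (-2) "" = b := by
      rw [PySem.List.pyGetD_neg_ofNat _ 2 "" (by omega) (by simp)]
      simp [hlen, List.getElem_append_right]
    have hg3 : PySem.List.pyGetD (zs ++ [c, b, a]) (-3) "" = c := by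
      rw [PySem.List.pyGetD_neg_ofNat _ 3 "" (by omega) (by simp)]
      simp [hlen, List.getElem_append_right]
    have hst : PySem.List.slice (zs ++ [c, b, a]) (some (-3)) none = [c, b, a] := by
      rw [PySem.List.slice_from_neg_ofNat _ 3 (by omega)]
      simp [hlen]
    have hne : zs ++ [c, b, a] ≠ [] := by simp
    simp only [allowed_movements_crucible, allowed_movements_crucible_alt, hst, hg1, hg2, hg3,
      if_neg hne, hlen]
    by_cases hthree : b = a ∧ c = a
    · obtain ⟨rfl, rfl⟩ : b = a ∧ c = a := hthree
      simp only [Pre_allowed_movements_crucible, hg1, hg2, hg3, hlen] at hpre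
      simp at hpre
      have hz : 3 ≤ zs.length + 3 := by omega
      by_cases hcn : c = "n"
      · subst hcn; simp [hz]; decide
      by_cases hcs : c = "s"
      · subst hcs; simp [hz]; decide
      by_cases hce : c = "e"
      · subst hce; simp [hz]; decide
      have hcw := hpre hcn hcs hce
      subst hcw; simp [hz]; decide
    · have hA : [c, b, a].length < 3 ∨ List.length (PySem.Set.ofList [c, b, a]) ≠ 1 := by
        refine Or.inr fun h => hthree ?_
        obtain ⟨hb, hc⟩ := (ofList3_len c b a).mp h
        exact ⟨hb.trans hc.symm, hc.symm⟩
      rw [if_pos hA]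
      have hr : (decide (3 ≤ zs.length + 3) && (c == b) && (b == a)) = false := by
        by_cases hba : b = a
        · have hcb : c ≠ b := fun h => hthree ⟨hba, h.trans hba⟩
          simp [hcb]
        · simp [hba]
      rw [hr]
      exact eq_norun a

-- ===== VERDICT (by name: the statement is the Claim_ definition above) =====
theorem allowed_movements_crucible_spec : Claim_equal_allowed_movements_crucible :=
  fun way _ hpre => ab_main way hpre
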